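-- pv_equiv track=rewrite | github.com/LongPhan1912/Python-Summer | Desktop/Python Summer /reddit_dailyprogrammer.py | yahtzee_upper
-- ===== SOURCE A (Python) =====
-- def yahtzee_upper(sorted_int_list):
--     d = dict()
--     max_result = 0
--     for key in sorted_int_list:
--         d[key] = d.get(key, 0) + 1
--         value = d[key]
--         if max_result < key * value: max_result = key * value
--     return max_result
-- ===== SOURCE B (Python) =====
-- def yahtzee_upper(sorted_int_list):
--     s = sorted(sorted_int_list)
--     best = 0
--     i = 0
--     n = len(s)
--     while i < n:
--         j = i + 1
--         while j < n and s[j] == s[i]: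
--             j += 1
--         prod = s[i] * (j - i)
--         if prod > best:
--             best = prod
--         i = j
--     return best
-- ===== Notes on version B (the rewrite author's own statement) =====
-- stated objective: alternative
-- what changed: Replaces the dict frequency counter and per-element running maximum with a sort-then-scan over consecutive equal runs, taking value*run_length once per distinct value.
import Mathlib
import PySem

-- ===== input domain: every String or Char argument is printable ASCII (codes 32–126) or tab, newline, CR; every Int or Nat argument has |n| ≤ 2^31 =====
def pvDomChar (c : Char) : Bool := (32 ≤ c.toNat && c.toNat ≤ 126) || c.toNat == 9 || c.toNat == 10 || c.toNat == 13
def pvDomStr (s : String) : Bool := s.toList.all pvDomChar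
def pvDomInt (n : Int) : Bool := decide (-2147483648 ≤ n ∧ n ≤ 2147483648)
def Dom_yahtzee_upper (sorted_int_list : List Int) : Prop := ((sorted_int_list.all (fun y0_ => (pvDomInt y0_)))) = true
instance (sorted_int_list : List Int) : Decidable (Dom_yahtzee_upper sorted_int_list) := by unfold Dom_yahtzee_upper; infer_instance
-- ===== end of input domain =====

-- B replaces A's dict frequency counter and per-element running maximum by a sort-then-scan
-- over consecutive equal runs (alternative decomposition; return value only, no mutation).

-- ===== PORT A =====
def yahtzee_upper (sorted_int_list : List Int) : Int :=
  (sorted_int_list.foldl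
    (fun (st : PySem.Dict Int Int × Int) key =>
      let d := st.1.insert key (st.1.getD key 0 + 1)
      let value := d.getD key 0
      (d, if st.2 < key * value then key * value else st.2))
    (PySem.Dict.empty, 0)).2

-- ===== PORT B =====
-- the outer while loop of Source B: one step per run of equal values in the sorted copy
def yahtzeeRunScan : List Int → Int → Int
  | [], best => best
  | v :: rest, best =>
      let run := rest.takeWhile (fun x => x == v)
      let prod := v * (1 + (run.length : Int))
      yahtzeeRunScan (rest.dropWhile (fun x => x == v)) (if prod > best then prod else best)
termination_by l _ => l.length
decreasing_by
  have := (List.dropWhile_sublist (l := rest) (fun x => x == v)).length_le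
  simp only [List.length_cons]
  omega

def yahtzee_upper_alt (sorted_int_list : List Int) : Int :=
  yahtzeeRunScan (PySem.List.sorted sorted_int_list (fun x => x) false) 0

-- ===== PRECONDITION & SPEC =====
def Spec_yahtzee_upper (sorted_int_list : List Int) (out : Int) : Prop := out = yahtzee_upper_alt sorted_int_list
instance (sorted_int_list : List Int) (out : Int) : Decidable (Spec_yahtzee_upper sorted_int_list out) := by unfold Spec_yahtzee_upper; infer_instance

-- ===== CLAIM (what is proved, stated in full; the proofs are below) =====
def Claim_equal_yahtzee_upper : Prop := ∀ (sorted_int_list : List Int), Dom_yahtzee_upper sorted_int_list → Spec_yahtzee_upper sorted_int_list (yahtzee_upper sorted_int_list)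

-- ===== LEMMAS AND PROOFS =====

-- the candidate values A's loop feeds to its running maximum, with c the counts so far
def yahtzeeCands : List Int → (Int → Int) → List Int
  | [], _ => []
  | k :: r, c => k * (c k + 1) :: yahtzeeCands r (fun v => if v = k then c k + 1 else c v)

-- the candidate values B's run scan feeds to its running maximum
def yahtzeeRuns : List Int → List Int
  | [] => []
  | v :: rest =>
      v * (1 + ((rest.takeWhile (fun x => x == v)).length : Int))
        :: yahtzeeRuns (rest.dropWhile (fun x => x == v))
termination_by l => l.length
decreasing_by
  have := (List.dropWhile_sublist (l := rest) (fun x => x == v)).length_le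
  simp only [List.length_cons]
  omega

theorem yahtzee_ite_max (m x : Int) : (if m < x then x else m) = max m x := by
  split <;> omega

theorem yahtzee_ite_max' (m x : Int) : (if x > m then x else m) = max m x := by
  split <;> omega

theorem yahtzee_A_fold (rest : List Int) (d : PySem.Dict Int Int) (m : Int) :
    (rest.foldl
      (fun (st : PySem.Dict Int Int × Int) key =>
        let d := st.1.insert key (st.1.getD key 0 + 1)
        let value := d.getD key 0
        (d, if st.2 < key * value then key * value else st.2))
      (d, m)).2 = (yahtzeeCands rest (fun k => d.getD k 0)).foldl max m := by
  induction rest generalizing d m with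
  | nil => rfl
  | cons k r ih =>
      simp only [List.foldl_cons, yahtzeeCands]
      rw [ih]
      have hc : (fun v => (d.insert k (d.getD k 0 + 1)).getD v 0)
          = (fun v => if v = k then d.getD k 0 + 1 else d.getD v 0) := by
        funext v
        exact PySem.Dict.getD_insert d k v _ 0
      rw [hc, PySem.Dict.getD_insert_self, yahtzee_ite_max]

theorem yahtzee_A_cands (l : List Int) :
    yahtzee_upper l = (yahtzeeCands l (fun _ => 0)).foldl max 0 := by
  unfold yahtzee_upper
  rw [yahtzee_A_fold]
  have h0 : (fun k => (PySem.Dict.empty : PySem.Dict Int Int).getD k 0) = (fun _ => (0 : Int)) := by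
    funext k
    exact PySem.Dict.getD_empty k 0
  rw [h0]

theorem yahtzee_B_runs (s : List Int) (m : Int) :
    yahtzeeRunScan s m = (yahtzeeRuns s).foldl max m := by
  induction s using yahtzeeRuns.induct generalizing m with
  | case1 => simp [yahtzeeRunScan, yahtzeeRuns]
  | case2 v rest ih =>
      rw [yahtzeeRunScan, yahtzeeRuns, List.foldl_cons, ih, yahtzee_ite_max']

-- every candidate of A is v*(c v + j) for some occurrence index 1 ≤ j ≤ count
theorem yahtzee_cands_bound (l : List Int) :
    ∀ (c : Int → Int), ∀ x ∈ yahtzeeCands l c,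
      ∃ v j, v ∈ l ∧ 1 ≤ j ∧ j ≤ (l.count v : Int) ∧ x = v * (c v + j) := by
  induction l with
  | nil => intro c x hx; simp [yahtzeeCands] at hx
  | cons k r ih =>
      intro c x hx
      simp only [yahtzeeCands, List.mem_cons] at hx
      rcases hx with h | h
      · refine ⟨k, 1, List.mem_cons_self, le_refl 1, ?_, h⟩
        have h1 : 1 ≤ (k :: r).count k := List.count_pos_iff.mpr List.mem_cons_self
        exact_mod_cast h1
      · obtain ⟨v, j, hv, hj1, hj2, hx⟩ := ih _ x h
        by_cases hvk : v = k
        · subst hvk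
          rw [if_pos rfl] at hx
          refine ⟨v, j + 1, List.mem_cons_self, by omega, ?_, by rw [hx]; ring⟩
          have hcnt : (v :: r).count v = r.count v + 1 := by simp
          rw [hcnt]; push_cast; omega
        · rw [if_neg hvk] at hx
          refine ⟨v, j, List.mem_cons_of_mem _ hv, hj1, ?_, hx⟩
          have hcnt : (k :: r).count v = r.count v := by
            simp [Ne.symm hvk]
          rw [hcnt]; exact hj2

-- for each value that occurs, its full count appears among A's candidates
theorem yahtzee_cands_mem (l : List Int) :
    ∀ (c : Int → Int), ∀ v ∈ l, v * (c v + (l.count v : Int)) ∈ yahtzeeCands l c := by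
  induction l with
  | nil => intro c v hv; simp at hv
  | cons k r ih =>
      intro c v hv
      simp only [yahtzeeCands, List.mem_cons]
      by_cases hvk : v = k
      · subst hvk
        by_cases hvr : v ∈ r
        · right
          have hih := ih (fun w => if w = v then c v + 1 else c w) v hvr
          simp only [if_pos] at hih
          have hcnt : (v :: r).count v = r.count v + 1 := by simp
          rw [hcnt]
          convert hih using 2
          push_cast; ring
        · left
          have h0 : r.count v = 0 := List.count_eq_zero.mpr hvr
          have hcnt : (v :: r).count v = 1 := by simp [h0]
          rw [hcnt]; norm_num
      · have hv' : v ∈ r := by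
          rcases List.mem_cons.mp hv with h | h
          · exact absurd h hvk
          · exact h
        right
        have hih := ih (fun w => if w = k then c k + 1 else c w) v hv'
        simp only [if_neg hvk] at hih
        have hcnt : (k :: r).count v = r.count v := by
          simp [Ne.symm hvk]
        rw [hcnt]; exact hih

-- on a sorted list, B's run candidates are exactly v * count v for the values v of the list
theorem yahtzee_runs_char (s : List Int) (hs : s.Pairwise (· ≤ ·)) :
    (∀ x ∈ yahtzeeRuns s, ∃ v, v ∈ s ∧ x = v * (s.count v : Int)) ∧
    (∀ v ∈ s, v * (s.count v : Int) ∈ yahtzeeRuns s) := by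
  induction s using yahtzeeRuns.induct with
  | case1 => simp [yahtzeeRuns]
  | case2 v rest ih =>
      have hrest : rest.Pairwise (· ≤ ·) := (List.pairwise_cons.mp hs).2
      have hle : ∀ x ∈ rest, v ≤ x := (List.pairwise_cons.mp hs).1
      have hsplit : rest.takeWhile (fun x => x == v) ++ rest.dropWhile (fun x => x == v) = rest :=
        List.takeWhile_append_dropWhile
      have hrunv : ∀ x ∈ rest.takeWhile (fun x => x == v), x = v := by
        intro x hx
        have := List.mem_takeWhile_imp hx
        simpa using this
      have hr'sorted : (rest.dropWhile (fun x => x == v)).Pairwise (· ≤ ·) :=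
        hrest.sublist (List.dropWhile_sublist _)
      have hvr' : v ∉ rest.dropWhile (fun x => x == v) := by
        intro hvmem
        rcases hre : rest.dropWhile (fun x => x == v) with _ | ⟨h0, t⟩
        · rw [hre] at hvmem; exact List.not_mem_nil hvmem
        · have hne : rest.dropWhile (fun x => x == v) ≠ [] := by rw [hre]; simp
          have h2 := List.head_dropWhile_not (fun x => x == v) hne
          have h3 : (rest.dropWhile (fun x => x == v)).head hne = h0 := by simp [hre]
          rw [h3] at h2
          have hh0v : h0 ≠ v := by simpa using h2
          have hh0mem : h0 ∈ rest := by
            rw [← hsplit]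
            exact List.mem_append_right _ (by rw [hre]; exact List.mem_cons_self)
          have hvlt : v < h0 := lt_of_le_of_ne (hle _ hh0mem) (Ne.symm hh0v)
          rw [hre] at hvmem hr'sorted
          rcases List.mem_cons.mp hvmem with h | h
          · exact hh0v h.symm
          · have := List.rel_of_pairwise_cons hr'sorted h
            omega
      have hcount_v : (((v :: rest).count v : Nat) : Int)
          = 1 + ((rest.takeWhile (fun x => x == v)).length : Int) := by
        have h1 : rest.count v = (rest.takeWhile (fun x => x == v)).count v
            + (rest.dropWhile (fun x => x == v)).count v := by
          conv_lhs => rw [← hsplit]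
          rw [List.count_append]
        have h2 : (rest.takeWhile (fun x => x == v)).count v
            = (rest.takeWhile (fun x => x == v)).length :=
          List.count_eq_length.mpr (fun b hb => (hrunv b hb).symm)
        have h3 : (rest.dropWhile (fun x => x == v)).count v = 0 :=
          List.count_eq_zero.mpr hvr'
        have h4 : (v :: rest).count v = rest.count v + 1 := by simp
        rw [h4, h1, h2, h3]; push_cast; ring
      have hcount_w : ∀ w ∈ rest.dropWhile (fun x => x == v),
          (v :: rest).count w = (rest.dropWhile (fun x => x == v)).count w := by
        intro w hw
        have hwv : w ≠ v := by intro h; exact hvr' (h ▸ hw)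
        have h1 : rest.count w = (rest.takeWhile (fun x => x == v)).count w
            + (rest.dropWhile (fun x => x == v)).count w := by
          conv_lhs => rw [← hsplit]
          rw [List.count_append]
        have h2 : (rest.takeWhile (fun x => x == v)).count w = 0 :=
          List.count_eq_zero.mpr (fun hmem => hwv (hrunv w hmem))
        have h4 : (v :: rest).count w = rest.count w := by
          simp [Ne.symm hwv]
        rw [h4, h1, h2]; omega
      obtain ⟨ihA, ihB⟩ := ih hr'sorted
      constructor
      · intro x hx
        rw [yahtzeeRuns] at hx
        rcases List.mem_cons.mp hx with h | h
        · exact ⟨v, List.mem_cons_self, by rw [h, hcount_v]⟩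
        · obtain ⟨w, hw, hxw⟩ := ihA x h
          refine ⟨w, ?_, ?_⟩
          · apply List.mem_cons_of_mem
            rw [← hsplit]
            exact List.mem_append_right _ hw
          · rw [hxw, hcount_w w hw]
      · intro w hw
        rw [yahtzeeRuns]
        rcases List.mem_cons.mp hw with h | h
        · subst h; rw [hcount_v]; exact List.mem_cons_self
        · rw [← hsplit] at h
          rcases List.mem_append.mp h with h' | h'
          · have hwv := hrunv w h'
            subst hwv
            rw [hcount_v]; exact List.mem_cons_self
          · rw [hcount_w w h']
            exact List.mem_cons_of_mem _ (ihB w h')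

theorem yahtzee_foldl_max_le (t : List Int) (a b : Int) (ha : a ≤ b) (h : ∀ y ∈ t, y ≤ b) :
    t.foldl max a ≤ b := by
  rcases PySem.List.foldl_max_mem t a with h1 | h1
  · rw [h1]; exact ha
  · exact h _ h1

-- ===== VERDICT (by name: the statement is the Claim_ definition above) =====
theorem yahtzee_upper_spec : Claim_equal_yahtzee_upper := by
  unfold Claim_equal_yahtzee_upper
  intro l _
  unfold Spec_yahtzee_upper yahtzee_upper_alt
  rw [yahtzee_A_cands, yahtzee_B_runs]
  have hperm : (PySem.List.sorted l (fun x => x) false).Perm l :=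
    PySem.List.sorted_perm l (fun x => x) false
  have hsorted : (PySem.List.sorted l (fun x => x) false).Pairwise (· ≤ ·) :=
    PySem.List.sorted_pairwise l (fun x => x)
  obtain ⟨hchar, hmem⟩ := yahtzee_runs_char _ hsorted
  have hcount : ∀ v : Int, (PySem.List.sorted l (fun x => x) false).count v = l.count v :=
    fun v => hperm.count_eq v
  have hR0 : (0 : Int) ≤ (yahtzeeRuns (PySem.List.sorted l (fun x => x) false)).foldl max 0 :=
    (PySem.List.le_foldl_max _ 0).1
  have hL0 : (0 : Int) ≤ (yahtzeeCands l (fun _ => 0)).foldl max 0 :=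
    (PySem.List.le_foldl_max _ 0).1
  apply le_antisymm
  · apply yahtzee_foldl_max_le _ _ _ hR0
    intro x hx
    obtain ⟨v, j, hv, hj1, hj2, hxeq⟩ := yahtzee_cands_bound l (fun _ => 0) x hx
    simp only [zero_add] at hxeq
    by_cases hvpos : 0 ≤ v
    · have hx_le : x ≤ v * (l.count v : Int) := by
        rw [hxeq]; exact mul_le_mul_of_nonneg_left hj2 hvpos
      have hmem' : v * ((PySem.List.sorted l (fun x => x) false).count v : Int)
          ∈ yahtzeeRuns (PySem.List.sorted l (fun x => x) false) := by
        apply hmem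
        exact hperm.mem_iff.mpr hv
      rw [hcount v] at hmem'
      calc x ≤ v * (l.count v : Int) := hx_le
        _ ≤ _ := (PySem.List.le_foldl_max _ 0).2 _ hmem'
    · have hxv : x ≤ v := by
        rw [hxeq]
        have := mul_le_mul_of_nonpos_left hj1 (by omega : v ≤ 0)
        simpa using this
      omega
  · apply yahtzee_foldl_max_le _ _ _ hL0
    intro x hx
    obtain ⟨v, hv, hxeq⟩ := hchar x hx
    have hvl : v ∈ l := hperm.mem_iff.mp hv
    have hmem' := yahtzee_cands_mem l (fun _ => 0) v hvl
    simp only [zero_add] at hmem'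
    rw [hxeq, hcount v]
    exact (PySem.List.le_foldl_max _ 0).2 _ hmem'
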